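-- pv_equiv track=rewrite | github.com/KimDuHong/Algorithm | 프로그래머스/lv1/42862. 체육복/체육복.py | solution
-- ===== SOURCE A (Python) =====
-- def solution(n, lost, reserve):
--     reserve_set = sorted([i for i in reserve if i not in lost])
--     lost_set = sorted([i for i in lost if i not in reserve])
--     answer = n-len(lost_set)
--     for i in lost_set:
--         if i-1 in reserve_set:
--             reserve_set.remove(i-1)
--             answer+=1
--         elif i+1 in reserve_set:
--             reserve_set.remove(i+1)
--             answer+=1
--     return answer
-- ===== SOURCE B (Python) =====
-- def solution(n, lost, reserve):
--     rset = set(reserve)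
--     lset = set(lost)
--     L = sorted(x for x in lost if x not in rset)
--     R = sorted(x for x in reserve if x not in lset)
--     matched = 0
--     i = j = 0
--     while i < len(L) and j < len(R):
--         if R[j] < L[i] - 1:
--             j += 1
--         elif R[j] > L[i] + 1:
--             i += 1
--         else:
--             matched += 1
--             i += 1
--             j += 1
--     return n - len(L) + matched
-- ===== Notes on version B (the rewrite author's own statement) =====
-- stated objective: faster
-- what changed: Replaces A's per-lost-student membership scans and list.remove calls on the reserve list with a single two-pointer merge over the two sorted lists (filtering done with set membership instead of list scans).
import Mathlib
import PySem

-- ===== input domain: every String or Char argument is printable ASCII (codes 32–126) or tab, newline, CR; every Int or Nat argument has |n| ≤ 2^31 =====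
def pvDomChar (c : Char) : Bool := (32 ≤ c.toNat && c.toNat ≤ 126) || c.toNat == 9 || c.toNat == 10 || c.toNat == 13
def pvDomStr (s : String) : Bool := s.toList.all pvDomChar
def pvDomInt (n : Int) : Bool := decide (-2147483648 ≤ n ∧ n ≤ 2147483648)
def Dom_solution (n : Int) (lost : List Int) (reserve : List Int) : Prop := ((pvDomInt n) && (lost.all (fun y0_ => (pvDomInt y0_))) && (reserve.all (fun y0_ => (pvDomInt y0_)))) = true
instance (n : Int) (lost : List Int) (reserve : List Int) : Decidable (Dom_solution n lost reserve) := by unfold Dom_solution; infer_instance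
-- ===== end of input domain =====

-- B replaces A's per-lost-student membership scans and list removals with one
-- two-pointer merge over the two sorted lists (objective: faster, O((l+r)·log) vs A's O(l·r)).

-- ===== PORT A =====
-- for-loop over lost_set carrying (reserve_set, answer); list.remove of a value
-- present by the guard = erase of its first occurrence (exact under the guard)
def solution (n : Int) (lost : List Int) (reserve : List Int) : Int :=
  let reserve_set := PySem.List.sorted (reserve.filter (fun i => !lost.contains i)) (fun x => x) false
  let lost_set := PySem.List.sorted (lost.filter (fun i => !reserve.contains i)) (fun x => x) false
  let answer : Int := n - lost_set.length
  (lost_set.foldl (fun (st : List Int × Int) i =>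
      if (i - 1) ∈ st.1 then (st.1.erase (i - 1), st.2 + 1)
      else if (i + 1) ∈ st.1 then (st.1.erase (i + 1), st.2 + 1)
      else st)
    (reserve_set, answer)).2

-- ===== PORT B =====
-- the while-loop of Source B on indices i, j, transcribed as recursion on the suffixes L[i:], R[j:]
def tpCount : List Int → List Int → Int
  | [], _ => 0
  | _ :: _, [] => 0
  | a :: ls, b :: rs =>
    if b < a - 1 then tpCount (a :: ls) rs
    else if b > a + 1 then tpCount ls (b :: rs)
    else 1 + tpCount ls rs
termination_by l r => l.length + r.length

def solution_alt (n : Int) (lost : List Int) (reserve : List Int) : Int :=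
  let rset := PySem.Set.ofList reserve
  let lset := PySem.Set.ofList lost
  let L := PySem.List.sorted (lost.filter (fun x => !decide (x ∈ rset))) (fun x => x) false
  let R := PySem.List.sorted (reserve.filter (fun x => !decide (x ∈ lset))) (fun x => x) false
  n - L.length + tpCount L R

-- ===== PRECONDITION & SPEC =====
def Spec_solution (n : Int) (lost : List Int) (reserve : List Int) (out : Int) : Prop := out = solution_alt n lost reserve
instance (n : Int) (lost : List Int) (reserve : List Int) (out : Int) : Decidable (Spec_solution n lost reserve out) := by unfold Spec_solution; infer_instance

-- ===== CLAIM (what is proved, stated in full; the proofs are below) =====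
def Claim_equal_solution : Prop := ∀ (n : Int) (lost : List Int) (reserve : List Int), Dom_solution n lost reserve → Spec_solution n lost reserve (solution n lost reserve)

-- ===== LEMMAS AND PROOFS =====

-- the match count extracted from A's fold
def greedy : List Int → List Int → Int
  | [], _ => 0
  | a :: L, rs =>
    if (a - 1) ∈ rs then 1 + greedy L (rs.erase (a - 1))
    else if (a + 1) ∈ rs then 1 + greedy L (rs.erase (a + 1))
    else greedy L rs

lemma foldA_eq_greedy (L : List Int) : ∀ (rs : List Int) (ans : Int),
    (L.foldl (fun (st : List Int × Int) i =>
      if (i - 1) ∈ st.1 then (st.1.erase (i - 1), st.2 + 1)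
      else if (i + 1) ∈ st.1 then (st.1.erase (i + 1), st.2 + 1)
      else st) (rs, ans)).2 = ans + greedy L rs := by
  induction L with
  | nil => intro rs ans; simp [greedy]
  | cons a L ih =>
      intro rs ans
      simp only [List.foldl_cons, greedy]
      split_ifs with h1 h2 <;> simp [ih] <;> ring

lemma greedy_nil (L : List Int) : greedy L [] = 0 := by
  induction L with
  | nil => rfl
  | cons a L ih => simp [greedy, ih]

lemma greedy_skip (L : List Int) : ∀ (rs : List Int) (b : Int),
    (∀ x ∈ L, b < x - 1) → greedy L (b :: rs) = greedy L rs := by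
  induction L with
  | nil => intro rs b _; rfl
  | cons a L ih =>
      intro rs b h
      have ha : b < a - 1 := h a (by simp)
      have h1 : a - 1 ≠ b := by omega
      have h2 : a + 1 ≠ b := by omega
      have hL : ∀ x ∈ L, b < x - 1 := fun x hx => h x (by simp [hx])
      simp only [greedy, List.mem_cons]
      have e1 : ((a - 1 = b ∨ (a - 1) ∈ rs) : Prop) ↔ (a - 1) ∈ rs :=
        ⟨fun h' => h'.resolve_left h1, Or.inr⟩
      have e2 : ((a + 1 = b ∨ (a + 1) ∈ rs) : Prop) ↔ (a + 1) ∈ rs :=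
        ⟨fun h' => h'.resolve_left h2, Or.inr⟩
      rw [if_congr e1 rfl rfl, if_congr e2 rfl rfl]
      rw [List.erase_cons_tail (by simpa using fun h' => h1 h'.symm),
          List.erase_cons_tail (by simpa using fun h' => h2 h'.symm)]
      split_ifs with m1 m2
      · rw [ih (rs.erase (a - 1)) b (fun x hx => hL x hx)]
      · rw [ih (rs.erase (a + 1)) b (fun x hx => hL x hx)]
      · rw [ih rs b hL]

lemma not_mem_of_lt_head {b v : Int} {rs : List Int}
    (hp : (b :: rs).Pairwise (· ≤ ·)) (hv : v < b) : v ∉ b :: rs := by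
  intro hmem
  rcases List.mem_cons.mp hmem with h | h
  · omega
  · have := (List.pairwise_cons.mp hp).1 v h; omega

lemma greedy_eq_tp : ∀ (k : Nat) (L R : List Int), L.length + R.length ≤ k →
    L.Pairwise (· ≤ ·) → R.Pairwise (· ≤ ·) → (∀ a ∈ L, a ∉ R) →
    greedy L R = tpCount L R := by
  intro k
  induction k with
  | zero =>
      intro L R hk _ _ _
      have : L = [] := by cases L <;> simp_all
      subst this; simp [greedy, tpCount]
  | succ k ih =>
      intro L R hk hL hR hdis
      match L, R with
      | [], R' => simp [greedy, tpCount]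
      | a :: L', [] => simp [greedy, greedy_nil, tpCount]
      | a :: L', b :: rs =>
        have hLlen : L'.length + (b :: rs).length ≤ k := by simp at hk ⊢; omega
        have hRlen : (a :: L').length + rs.length ≤ k := by simp at hk ⊢; omega
        have hLLlen : L'.length + rs.length ≤ k := by simp at hk ⊢; omega
        have hL' : L'.Pairwise (· ≤ ·) := (List.pairwise_cons.mp hL).2
        have hR' : rs.Pairwise (· ≤ ·) := (List.pairwise_cons.mp hR).2
        have hdis' : ∀ x ∈ L', x ∉ b :: rs := fun x hx => hdis x (by simp [hx])
        have hdis'' : ∀ x ∈ L', x ∉ rs := fun x hx h => hdis' x hx (by simp [h])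
        have hanR : a ∉ b :: rs := hdis a (by simp)
        by_cases hb1 : b < a - 1
        · -- reserve head too small for every lost student: skip it on both sides
          have hskip : ∀ x ∈ a :: L', b < x - 1 := by
            intro x hx
            rcases List.mem_cons.mp hx with h | h
            · omega
            · have := (List.pairwise_cons.mp hL).1 x h; omega
          rw [greedy_skip (a :: L') rs b hskip]
          rw [show tpCount (a :: L') (b :: rs) = tpCount (a :: L') rs by
                simp [tpCount, hb1]]
          exact ih (a :: L') rs hRlen hL hR' (fun x hx h => hdis x hx (by simp [h]))
        · have hbge : a - 1 ≤ b := by omega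
          by_cases hbeq : b = a - 1
          · -- match with the left neighbour: both take the head of R
            subst hbeq
            simp only [greedy, List.mem_cons, true_or, if_pos, List.erase_cons_head]
            rw [show tpCount (a :: L') ((a-1) :: rs) = 1 + tpCount L' rs by
                  simp [tpCount]; omega]
            rw [ih L' rs hLLlen hL' hR' hdis'']
          · have hba : a + 1 ≤ b := by
              have : b ≠ a := fun h => hanR (by simp [h])
              omega
            have hnm1 : (a - 1) ∉ b :: rs := not_mem_of_lt_head hR (by omega)
            by_cases hbeq2 : b = a + 1
            · -- match with the right neighbour
              subst hbeq2
              have hm : (a + 1) ∈ (a+1) :: rs := by simp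
              rw [show greedy (a :: L') ((a+1) :: rs)
                    = 1 + greedy L' (((a+1) :: rs).erase (a+1)) by
                    simp [greedy, hnm1]]
              simp only [List.erase_cons_head]
              rw [show tpCount (a :: L') ((a+1) :: rs) = 1 + tpCount L' rs by
                    simp [tpCount]; omega]
              rw [ih L' rs hLLlen hL' hR' hdis'']
            · -- reserve head beyond a+1: a gets nothing on both sides
              have hgt : a + 1 < b := by omega
              have hnm2 : (a + 1) ∉ b :: rs := not_mem_of_lt_head hR (by omega)
              rw [show greedy (a :: L') (b :: rs) = greedy L' (b :: rs) by
                    simp [greedy, hnm1, hnm2]]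
              rw [show tpCount (a :: L') (b :: rs) = tpCount L' (b :: rs) by
                    simp [tpCount, hb1, hgt]]
              exact ih L' (b :: rs) hLlen hL' hR hdis'

-- ===== VERDICT (by name: the statement is the Claim_ definition above) =====
theorem solution_spec : Claim_equal_solution := by
  intro n lost reserve _
  unfold Spec_solution solution solution_alt
  have hfL : lost.filter (fun x => !decide (x ∈ PySem.Set.ofList reserve))
      = lost.filter (fun i => !reserve.contains i) := by
    apply List.filter_congr
    intro x _
    simp [PySem.Set.mem_ofList]
  have hfR : reserve.filter (fun x => !decide (x ∈ PySem.Set.ofList lost))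
      = reserve.filter (fun i => !lost.contains i) := by
    apply List.filter_congr
    intro x _
    simp [PySem.Set.mem_ofList]
  show (List.foldl (fun (st : List Int × Int) i =>
      if (i - 1) ∈ st.1 then (st.1.erase (i - 1), st.2 + 1)
      else if (i + 1) ∈ st.1 then (st.1.erase (i + 1), st.2 + 1)
      else st)
      (PySem.List.sorted (reserve.filter (fun i => !lost.contains i)) (fun x => x) false,
       n - ((PySem.List.sorted (lost.filter (fun i => !reserve.contains i)) (fun x => x) false).length : Int))
      (PySem.List.sorted (lost.filter (fun i => !reserve.contains i)) (fun x => x) false)).2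
    = n - ((PySem.List.sorted (lost.filter (fun x => !decide (x ∈ PySem.Set.ofList reserve))) (fun x => x) false).length : Int)
      + tpCount (PySem.List.sorted (lost.filter (fun x => !decide (x ∈ PySem.Set.ofList reserve))) (fun x => x) false)
                (PySem.List.sorted (reserve.filter (fun x => !decide (x ∈ PySem.Set.ofList lost))) (fun x => x) false)
  rw [hfL, hfR]
  set L := PySem.List.sorted (lost.filter (fun i => !reserve.contains i)) (fun x => x) false with hLdef
  set R := PySem.List.sorted (reserve.filter (fun i => !lost.contains i)) (fun x => x) false with hRdef
  have hLp : L.Pairwise (· ≤ ·) :=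
    PySem.List.sorted_pairwise (lost.filter (fun i => !reserve.contains i)) (fun x => x)
  have hRp : R.Pairwise (· ≤ ·) :=
    PySem.List.sorted_pairwise (reserve.filter (fun i => !lost.contains i)) (fun x => x)
  have hdis : ∀ a ∈ L, a ∉ R := by
    intro a haL haR
    have h1 : a ∈ lost.filter (fun i => !reserve.contains i) :=
      (PySem.List.mem_sorted _ _ _ _).mp haL
    have h2 : a ∈ reserve.filter (fun i => !lost.contains i) :=
      (PySem.List.mem_sorted _ _ _ _).mp haR
    have hnr : ¬ a ∈ reserve := by
      have := (List.mem_filter.mp h1).2; simpa [List.contains_iff_mem] using this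
    exact hnr (List.mem_filter.mp h2).1
  rw [foldA_eq_greedy]
  rw [greedy_eq_tp (L.length + R.length) L R le_rfl hLp hRp hdis]
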